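-- pv_equiv track=rewrite | github.com/Y-Baker/ICPC | codeforces/Contests/Round#964/a.py | calcWins
-- ===== SOURCE A (Python) =====
-- def calcWins(a1, a2, b1, b2):
--     rounds = [
--         (a1, b1, a2, b2),
--         (a1, b2, a2, b1),
--         (a2, b1, a1, b2),
--         (a2, b2, a1, b1)
--     ]
--     win_count = 0
--     cnt1 = 0
--     cnt2 = 0
--
--     for (s1, t1, s2, t2) in rounds:
--         cnt1 = 0
--         cnt2 = 0
--
--         if s1 > t1:
--             cnt1 += 1
--         elif s1 < t1:
--             cnt2 += 1
--
--         if s2 > t2: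
--             cnt1 += 1
--         elif s2 < t2:
--             cnt2 += 1
--
--         if cnt1 > cnt2:
--             win_count += 1
--     return win_count
-- ===== SOURCE B (Python) =====
-- def calcWins(a1, a2, b1, b2):
--     # Each of the four listed rounds is one of two pairings, each repeated twice.
--     def sign(x, y):
--         return (x > y) - (x < y)
--     p = 1 if sign(a1, b1) + sign(a2, b2) > 0 else 0
--     q = 1 if sign(a1, b2) + sign(a2, b1) > 0 else 0
--     return 2 * (p + q)
-- ===== Notes on version B (the rewrite author's own statement) =====
-- stated objective: simpler
-- what changed: Replaced the loop over four explicit round tuples with counter pairs by a closed form: each round's outcome is sign(s1-t1)+sign(s2-t2)>0 and the four rounds are two pairings each occurring twice, so the result is 2*(p+q).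
import Mathlib
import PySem

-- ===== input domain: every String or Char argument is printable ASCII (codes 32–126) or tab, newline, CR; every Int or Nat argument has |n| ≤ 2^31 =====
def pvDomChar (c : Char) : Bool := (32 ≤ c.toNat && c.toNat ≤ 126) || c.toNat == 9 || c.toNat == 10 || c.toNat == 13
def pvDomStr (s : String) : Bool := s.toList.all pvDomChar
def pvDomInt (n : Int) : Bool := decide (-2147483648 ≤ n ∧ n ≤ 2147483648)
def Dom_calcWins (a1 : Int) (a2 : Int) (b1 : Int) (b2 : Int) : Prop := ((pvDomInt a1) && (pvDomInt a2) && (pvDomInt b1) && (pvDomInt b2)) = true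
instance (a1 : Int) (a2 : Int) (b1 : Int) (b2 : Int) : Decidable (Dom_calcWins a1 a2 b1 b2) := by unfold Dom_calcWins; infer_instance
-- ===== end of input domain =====

-- B replaces A's loop over the four round tuples by a closed form using the sign
-- of each pairwise comparison (simpler; same O(1) cost).

-- ===== PORT A =====
-- one iteration of A's loop body: reset cnt1/cnt2, do the two if/elif blocks, bump win_count
def calcWinsStep (win_count : Int) (r : Int × Int × Int × Int) : Int :=
  let s1 := r.1; let t1 := r.2.1; let s2 := r.2.2.1; let t2 := r.2.2.2
  let cnt1 : Int := 0
  let cnt2 : Int := 0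
  let cnt1 := if s1 > t1 then cnt1 + 1 else cnt1
  let cnt2 := if ¬ (s1 > t1) ∧ s1 < t1 then cnt2 + 1 else cnt2
  let cnt1 := if s2 > t2 then cnt1 + 1 else cnt1
  let cnt2 := if ¬ (s2 > t2) ∧ s2 < t2 then cnt2 + 1 else cnt2
  if cnt1 > cnt2 then win_count + 1 else win_count

def calcWins (a1 : Int) (a2 : Int) (b1 : Int) (b2 : Int) : Int :=
  let rounds : List (Int × Int × Int × Int) :=
    [(a1, b1, a2, b2), (a1, b2, a2, b1), (a2, b1, a1, b2), (a2, b2, a1, b1)]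
  rounds.foldl calcWinsStep 0

-- ===== PORT B =====
def pySign (x : Int) (y : Int) : Int :=
  (if x > y then (1 : Int) else 0) - (if x < y then (1 : Int) else 0)

def calcWins_alt (a1 : Int) (a2 : Int) (b1 : Int) (b2 : Int) : Int :=
  let p : Int := if pySign a1 b1 + pySign a2 b2 > 0 then 1 else 0
  let q : Int := if pySign a1 b2 + pySign a2 b1 > 0 then 1 else 0
  2 * (p + q)

-- ===== PRECONDITION & SPEC =====
def Spec_calcWins (a1 : Int) (a2 : Int) (b1 : Int) (b2 : Int) (out : Int) : Prop := out = calcWins_alt a1 a2 b1 b2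
instance (a1 : Int) (a2 : Int) (b1 : Int) (b2 : Int) (out : Int) : Decidable (Spec_calcWins a1 a2 b1 b2 out) := by unfold Spec_calcWins; infer_instance

-- ===== CLAIM (what is proved, stated in full; the proofs are below) =====
def Claim_equal_calcWins : Prop := ∀ (a1 : Int) (a2 : Int) (b1 : Int) (b2 : Int), Dom_calcWins a1 a2 b1 b2 → Spec_calcWins a1 a2 b1 b2 (calcWins a1 a2 b1 b2)

-- ===== LEMMAS AND PROOFS =====

-- each loop iteration of A adds 1 exactly when the sign-sum of its two comparisons is positive
theorem calcWinsStep_eq (w s1 t1 s2 t2 : Int) :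
    calcWinsStep w (s1, t1, s2, t2) = w + (if 0 < pySign s1 t1 + pySign s2 t2 then 1 else 0) := by
  unfold calcWinsStep pySign
  dsimp only
  split_ifs <;> omega

-- ===== VERDICT (by name: the statement is the Claim_ definition above) =====
theorem calcWins_spec : Claim_equal_calcWins := by
  intro a1 a2 b1 b2 _
  unfold Spec_calcWins calcWins calcWins_alt
  simp only [List.foldl, calcWinsStep_eq]
  split_ifs <;> omega
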